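-- pv_equiv track=rewrite | github.com/parrisma/gofr-iq | app/services/query_service.py | _violates_exclusions
-- ===== SOURCE A (Python) =====
-- def _violates_exclusions(
--
--     doc_entities: dict[str, list[str]],
--     exclusions: dict[str, list[str]],
-- ) -> bool:
--     excluded_companies = {c.lower() for c in exclusions.get("companies", []) if c}
--     excluded_sectors = {s.lower() for s in exclusions.get("sectors", []) if s}
--
--     for company in doc_entities.get("companies", []):
--         if company and company.lower() in excluded_companies:
--             return True
--     for sector in doc_entities.get("sectors", []):
--         if sector and sector.lower() in excluded_sectors:
--             return True
--     return False
-- ===== SOURCE B (Python) =====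
-- def _hit(doc_vals, exc_vals):
--     d = sorted(v.lower() for v in doc_vals if v)
--     e = sorted(v.lower() for v in exc_vals if v)
--     i = j = 0
--     while i < len(d) and j < len(e):
--         if d[i] == e[j]:
--             return True
--         if d[i] < e[j]:
--             i += 1
--         else:
--             j += 1
--     return False
--
--
-- def _violates_exclusions(
--     doc_entities: dict[str, list[str]],
--     exclusions: dict[str, list[str]],
-- ) -> bool:
--     return _hit(doc_entities.get("companies", []), exclusions.get("companies", [])) or _hit(
--         doc_entities.get("sectors", []), exclusions.get("sectors", [])
--     )
-- ===== Notes on version B (the rewrite author's own statement) =====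
-- stated objective: alternative
-- what changed: Instead of hashing one side into sets and scanning the other, B sorts both normalized (lowercased, falsy-dropped) lists per category and detects a common element with a two-pointer merge scan; no hash set and no membership test remain.
import Mathlib
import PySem

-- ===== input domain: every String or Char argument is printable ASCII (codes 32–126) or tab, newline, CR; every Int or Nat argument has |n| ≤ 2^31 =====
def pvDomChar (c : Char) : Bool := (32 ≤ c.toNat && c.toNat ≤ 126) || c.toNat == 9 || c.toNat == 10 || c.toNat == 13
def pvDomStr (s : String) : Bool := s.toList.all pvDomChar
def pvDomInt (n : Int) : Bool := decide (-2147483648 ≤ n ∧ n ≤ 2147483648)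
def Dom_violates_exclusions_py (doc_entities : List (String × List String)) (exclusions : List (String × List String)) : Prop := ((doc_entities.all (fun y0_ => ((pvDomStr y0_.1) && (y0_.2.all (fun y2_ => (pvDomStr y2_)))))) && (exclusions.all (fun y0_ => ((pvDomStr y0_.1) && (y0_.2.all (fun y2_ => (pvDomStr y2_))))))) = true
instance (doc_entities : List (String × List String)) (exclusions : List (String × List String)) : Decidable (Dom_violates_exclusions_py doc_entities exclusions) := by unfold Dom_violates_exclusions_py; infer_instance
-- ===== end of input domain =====

-- B replaces A's hash-set membership scans by per-category sort + two-pointer merge scans (alternative algorithm; not faster).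

-- ===== PORT A =====
-- A: build the two lowercased exclusion sets, then scan each doc list with an early return on the first hit.
def violates_exclusions_py (doc_entities : List (String × List String)) (exclusions : List (String × List String)) : Bool :=
  let excluded_companies : PySem.Set String :=
    PySem.Set.ofList ((((PySem.Dict.mk exclusions).getD "companies" []).filter (fun c => c != "")).map PySem.Str.lower)
  let excluded_sectors : PySem.Set String :=
    PySem.Set.ofList ((((PySem.Dict.mk exclusions).getD "sectors" []).filter (fun s => s != "")).map PySem.Str.lower)
  -- the two for-loops with 'return True' = short-circuiting List.any scans
  (((PySem.Dict.mk doc_entities).getD "companies" []).any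
      (fun company => company != "" && PySem.Set.contains excluded_companies (PySem.Str.lower company))) ||
  (((PySem.Dict.mk doc_entities).getD "sectors" []).any
      (fun sector => sector != "" && PySem.Set.contains excluded_sectors (PySem.Str.lower sector)))

-- ===== PORT B =====
-- B's while-loop with indices i, j: the two suffixes d[i:], e[j:] are the recursion state.
def pvMerge : List String → List String → Bool
  | [], _ => false
  | _ :: _, [] => false
  | a :: as, b :: bs =>
    if a = b then true
    else if a < b then pvMerge as (b :: bs)
    else pvMerge (a :: as) bs
termination_by xs ys => xs.length + ys.length

-- B's _hit: sort both normalized lists, then merge-scan for a common element.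
def pvHit (doc_vals exc_vals : List String) : Bool :=
  let d := PySem.List.sorted ((doc_vals.filter (fun v => v != "")).map PySem.Str.lower) (fun x => x) false
  let e := PySem.List.sorted ((exc_vals.filter (fun v => v != "")).map PySem.Str.lower) (fun x => x) false
  pvMerge d e

def violates_exclusions_py_alt (doc_entities : List (String × List String)) (exclusions : List (String × List String)) : Bool :=
  pvHit ((PySem.Dict.mk doc_entities).getD "companies" []) ((PySem.Dict.mk exclusions).getD "companies" []) ||
  pvHit ((PySem.Dict.mk doc_entities).getD "sectors" []) ((PySem.Dict.mk exclusions).getD "sectors" [])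

-- ===== PRECONDITION & SPEC =====
def Spec_violates_exclusions_py (doc_entities : List (String × List String)) (exclusions : List (String × List String)) (out : Bool) : Prop := out = violates_exclusions_py_alt doc_entities exclusions
instance (doc_entities : List (String × List String)) (exclusions : List (String × List String)) (out : Bool) : Decidable (Spec_violates_exclusions_py doc_entities exclusions out) := by unfold Spec_violates_exclusions_py; infer_instance

-- ===== CLAIM (what is proved, stated in full; the proofs are below) =====
def Claim_equal_violates_exclusions_py : Prop := ∀ (doc_entities : List (String × List String)) (exclusions : List (String × List String)), Dom_violates_exclusions_py doc_entities exclusions → Spec_violates_exclusions_py doc_entities exclusions (violates_exclusions_py doc_entities exclusions)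

-- ===== LEMMAS AND PROOFS =====

-- The merge scan on two ≤-sorted lists is exactly the common-element test.
theorem pvMerge_iff (xs ys : List String) (hx : xs.Pairwise (· ≤ ·)) (hy : ys.Pairwise (· ≤ ·)) :
    pvMerge xs ys = true ↔ ∃ x, x ∈ xs ∧ x ∈ ys := by
  induction xs, ys using pvMerge.induct with
  | case1 ys => simp [pvMerge]
  | case2 a as => simp [pvMerge]
  | case3 xs' x ys' =>
    simp only [pvMerge, if_true, true_iff]
    exact ⟨x, List.mem_cons_self, List.mem_cons_self⟩
  | case4 a as b bs hne hlt ih =>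
    rw [pvMerge, if_neg hne, if_pos hlt]
    rw [ih (List.pairwise_cons.mp hx).2 hy]
    constructor
    · rintro ⟨x, hxs, hys⟩; exact ⟨x, List.mem_cons_of_mem a hxs, hys⟩
    · rintro ⟨x, hxs, hys⟩
      rcases List.mem_cons.mp hxs with rfl | hxs'
      · rcases List.mem_cons.mp hys with rfl | hys'
        · exact absurd rfl hne
        · exact absurd ((List.pairwise_cons.mp hy).1 x hys') (not_le.mpr hlt)
      · exact ⟨x, hxs', hys⟩
  | case5 a as b bs hne hnlt ih =>
    have hba : b < a := lt_of_le_of_ne (not_lt.mp hnlt) (fun h => hne h.symm)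
    rw [pvMerge, if_neg hne, if_neg hnlt]
    rw [ih hx (List.pairwise_cons.mp hy).2]
    constructor
    · rintro ⟨x, hxs, hys⟩; exact ⟨x, hxs, List.mem_cons_of_mem b hys⟩
    · rintro ⟨x, hxs, hys⟩
      rcases List.mem_cons.mp hys with rfl | hys'
      · rcases List.mem_cons.mp hxs with rfl | hxs'
        · exact absurd rfl hne
        · exact absurd ((List.pairwise_cons.mp hx).1 x hxs') (not_le.mpr hba)
      · exact ⟨x, hxs, hys'⟩

-- A's early-return scan of xs against the lowered set from ys equals B's sort + merge scan.
theorem pv_any_eq_hit (xs ys : List String) :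
    (xs.any (fun c => c != "" && PySem.Set.contains
        (PySem.Set.ofList ((ys.filter (fun v => v != "")).map PySem.Str.lower)) (PySem.Str.lower c)))
      = pvHit xs ys := by
  unfold pvHit
  rw [Bool.eq_iff_iff]
  rw [pvMerge_iff _ _
    (by simpa using PySem.List.sorted_pairwise ((xs.filter (fun v => v != "")).map PySem.Str.lower) (fun x => x))
    (by simpa using PySem.List.sorted_pairwise ((ys.filter (fun v => v != "")).map PySem.Str.lower) (fun x => x))]
  simp only [List.any_eq_true, Bool.and_eq_true, PySem.Set.contains_iff, PySem.Set.mem_ofList,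
    PySem.List.mem_sorted, List.mem_map, List.mem_filter, bne_iff_ne]
  constructor
  · rintro ⟨c, hc, hne, e, ⟨he, hene⟩, hle⟩
    exact ⟨PySem.Str.lower c, ⟨c, ⟨hc, by simpa using hne⟩, rfl⟩, ⟨e, ⟨he, hene⟩, hle⟩⟩
  · rintro ⟨x, ⟨c, ⟨hc, hne⟩, rfl⟩, e, ⟨he, hene⟩, hle⟩
    exact ⟨c, hc, by simpa using hne, e, ⟨he, hene⟩, hle⟩

-- ===== VERDICT (by name: the statement is the Claim_ definition above) =====
theorem violates_exclusions_py_spec : Claim_equal_violates_exclusions_py := by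
  intro doc_entities exclusions _
  show violates_exclusions_py doc_entities exclusions = violates_exclusions_py_alt doc_entities exclusions
  simp only [violates_exclusions_py, violates_exclusions_py_alt, pv_any_eq_hit]
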